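-- pv_equiv track=rewrite | github.com/StrategicMilk/Vetinari-Orchestrastor | vetinari/plan_mode.py | _generate_dependencies
-- ===== SOURCE A (Python) =====
-- from typing import List, Dict, Optional, Any, Callable
--
-- def _generate_dependencies(subtask_count: int) -> Dict[str, List[str]]:
--     """Generate task dependencies."""
--     deps = {}
--     for i in range(subtask_count):
--         task_id = f"subtask_{i:03d}"
--         if i > 0 and i % 3 == 0:
--             deps[task_id] = [f"subtask_{i-1:03d}"]
--         else:
--             deps[task_id] = []
--     return deps
-- ===== SOURCE B (Python) =====
-- def _generate_dependencies(subtask_count):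
--     """Generate task dependencies by walking blocks of three subtasks: each block
--     head (except the very first) depends on the previous subtask; the remaining
--     members of the block have no dependencies. No modulo test is needed."""
--     deps = {}
--     for base in range(0, subtask_count, 3):
--         deps[f"subtask_{base:03d}"] = [f"subtask_{base - 1:03d}"] if base > 0 else []
--         for i in range(base + 1, min(base + 3, subtask_count)):
--             deps[f"subtask_{i:03d}"] = []
--     return deps
-- ===== Notes on version B (the rewrite author's own statement) =====
-- stated objective: alternative
-- what changed: A's flat loop with a per-index modulo test is replaced by a two-level traversal over stride-3 blocks: the outer loop visits block heads (which get the dependency, except block 0), the inner loop emits the dependency-free members of each block, so no modulo operation occurs at all.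
import Mathlib
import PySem

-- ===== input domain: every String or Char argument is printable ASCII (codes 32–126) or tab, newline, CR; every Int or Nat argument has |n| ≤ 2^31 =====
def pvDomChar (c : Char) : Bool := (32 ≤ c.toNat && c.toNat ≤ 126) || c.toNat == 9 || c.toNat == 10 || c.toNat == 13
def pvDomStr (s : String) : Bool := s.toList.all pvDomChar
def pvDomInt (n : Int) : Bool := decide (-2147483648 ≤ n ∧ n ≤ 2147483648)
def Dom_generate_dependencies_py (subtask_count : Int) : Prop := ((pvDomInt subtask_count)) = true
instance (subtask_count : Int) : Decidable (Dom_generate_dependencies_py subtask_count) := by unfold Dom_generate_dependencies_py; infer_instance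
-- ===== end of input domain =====

-- B replaces A's flat loop with a per-index modulo test by a two-level traversal over
-- stride-3 blocks (head entry with the dependency, then the plain members); same O(n)
-- cost (alternative decomposition).

-- ===== PORT A =====
-- Hand port of the decimal digits of a natural number (str(i) for i ≥ 0): exact —
-- big-endian decimal digits, no leading zeros.
def pvDigits (n : Nat) : List Char :=
  if n < 10 then [Nat.digitChar n] else pvDigits (n / 10) ++ [Nat.digitChar (n % 10)]
decreasing_by omega

-- Hand port of zero-padding to width 3 (the ':03d' format for a nonnegative argument): exact
-- for digit strings (no sign present, as here).
def pvPad3 (cs : List Char) : List Char := List.replicate (3 - cs.length) '0' ++ cs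

-- Hand port of f"subtask_{i:03d}": exact for 0 ≤ i (the only arguments the ports use).
def pvTaskId (i : Int) : String := String.ofList ("subtask_".toList ++ pvPad3 (pvDigits i.toNat))

def generate_dependencies_py (subtask_count : Int) : List (String × List String) :=
  ((PySem.List.pyRange 0 subtask_count 1).foldl
    (fun (deps : PySem.Dict String (List String)) i =>
      let task_id := pvTaskId i
      if 0 < i ∧ PySem.Int.mod i 3 = 0 then
        deps.insert task_id [pvTaskId (i - 1)]
      else
        deps.insert task_id []) PySem.Dict.empty).items

-- ===== PORT B =====
def generate_dependencies_py_alt (subtask_count : Int) : List (String × List String) :=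
  ((PySem.List.pyRange 0 subtask_count 3).foldl
    (fun (deps : PySem.Dict String (List String)) base =>
      let deps := deps.insert (pvTaskId base)
        (if 0 < base then [pvTaskId (base - 1)] else [])
      (PySem.List.pyRange (base + 1) (min (base + 3) subtask_count) 1).foldl
        (fun d i => d.insert (pvTaskId i) []) deps)
    PySem.Dict.empty).items

-- ===== PRECONDITION & SPEC =====
def Spec_generate_dependencies_py (subtask_count : Int) (out : List (String × List String)) : Prop := out = generate_dependencies_py_alt subtask_count
instance (subtask_count : Int) (out : List (String × List String)) : Decidable (Spec_generate_dependencies_py subtask_count out) := by unfold Spec_generate_dependencies_py; infer_instance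

-- ===== CLAIM (what is proved, stated in full; the proofs are below) =====
def Claim_equal_generate_dependencies_py : Prop := ∀ (subtask_count : Int), Dom_generate_dependencies_py subtask_count → Spec_generate_dependencies_py subtask_count (generate_dependencies_py subtask_count)

-- ===== LEMMAS AND PROOFS =====

-- value of a big-endian digit string (reading it back as a number)
def pvVal (cs : List Char) : Nat := cs.foldl (fun a c => 10 * a + (c.toNat - 48)) 0

lemma pvVal_append_digit (xs : List Char) (c : Char) :
    pvVal (xs ++ [c]) = 10 * pvVal xs + (c.toNat - 48) := by
  simp [pvVal]

lemma pvDigitChar_val {m : Nat} (h : m < 10) : (Nat.digitChar m).toNat - 48 = m := by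
  interval_cases m <;> decide

lemma pvVal_pvDigits (n : Nat) : pvVal (pvDigits n) = n := by
  fun_induction pvDigits n with
  | case1 n h =>
    simpa [pvVal] using pvDigitChar_val h
  | case2 n h ih =>
    rw [pvVal_append_digit, ih, pvDigitChar_val (Nat.mod_lt _ (by norm_num))]
    omega

lemma pvVal_pad (k : Nat) (cs : List Char) :
    pvVal (List.replicate k '0' ++ cs) = pvVal cs := by
  induction k with
  | zero => rfl
  | succ k ih =>
    have : List.replicate (k + 1) '0' ++ cs = '0' :: (List.replicate k '0' ++ cs) := by
      simp [List.replicate_succ]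
    rw [this]
    simpa [pvVal] using ih

lemma pvVal_pvPad3 (cs : List Char) : pvVal (pvPad3 cs) = pvVal cs := by
  simp [pvPad3, pvVal_pad]

lemma pvTaskId_inj {i j : Int} (hi : 0 ≤ i) (hj : 0 ≤ j) (h : pvTaskId i = pvTaskId j) :
    i = j := by
  have h2 : pvPad3 (pvDigits i.toNat) = pvPad3 (pvDigits j.toNat) := by
    have h' := String.ofList_inj.mp h
    simpa using h'
  have h3 : i.toNat = j.toNat := by
    have := congrArg pvVal h2
    rwa [pvVal_pvPad3, pvVal_pvPad3, pvVal_pvDigits, pvVal_pvDigits] at this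
  omega

lemma pv_nodup_keys (n : Int) :
    ((PySem.List.pyRange 0 n 1).map pvTaskId).Nodup := by
  refine List.Nodup.map_on ?_ (PySem.List.nodup_pyRange_one 0 n)
  intro x hx y hy hxy
  rw [PySem.List.mem_pyRange_one] at hx hy
  exact pvTaskId_inj hx.1 hy.1 hxy

-- a fold of inserts over the fresh distinct keys of range(n) builds exactly the mapped list
lemma pv_fresh_fold (n : Int) (v : Int → List String) :
    ((PySem.List.pyRange 0 n 1).foldl
      (fun (d : PySem.Dict String (List String)) i => d.insert (pvTaskId i) (v i))
      PySem.Dict.empty).items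
    = (PySem.List.pyRange 0 n 1).map (fun i => (pvTaskId i, v i)) := by
  rw [PySem.Dict.items_foldl_insert_fresh _ pvTaskId v _ (by
        intro a _; exact PySem.Dict.contains_empty _) (pv_nodup_keys n)]
  rfl

lemma pv_itemsA (n : Int) :
    generate_dependencies_py n
    = (PySem.List.pyRange 0 n 1).map
        (fun i => (pvTaskId i,
          if 0 < i ∧ PySem.Int.mod i 3 = 0 then [pvTaskId (i - 1)] else [])) := by
  unfold generate_dependencies_py
  have hfun : (fun (deps : PySem.Dict String (List String)) i =>
      let task_id := pvTaskId i
      if 0 < i ∧ PySem.Int.mod i 3 = 0 then deps.insert task_id [pvTaskId (i - 1)]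
      else deps.insert task_id [])
    = fun (d : PySem.Dict String (List String)) i =>
        d.insert (pvTaskId i)
          (if 0 < i ∧ PySem.Int.mod i 3 = 0 then [pvTaskId (i - 1)] else []) := by
    funext d i
    dsimp only []
    by_cases h : 0 < i ∧ PySem.Int.mod i 3 = 0
    · rw [if_pos h, if_pos h]
    · rw [if_neg h, if_neg h]
  rw [hfun, pv_fresh_fold]

-- range with step 3: induction forms
lemma pvRange3_nil (a b : Int) (h : b ≤ a) : PySem.List.pyRange a b 3 = [] := by
  rw [PySem.List.pyRange_of_pos a b (by norm_num), if_neg (by omega)]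
  simp

lemma pvRange3_cons (a b : Int) (h : a < b) :
    PySem.List.pyRange a b 3 = a :: PySem.List.pyRange (a + 3) b 3 := by
  rw [PySem.List.pyRange_of_pos a b (by norm_num),
      PySem.List.pyRange_of_pos (a + 3) b (by norm_num), if_pos h]
  have hN : ((b - a + 3 - 1) / 3).toNat
      = (if a + 3 < b then ((b - (a + 3) + 3 - 1) / 3).toNat else 0) + 1 := by
    split_ifs with h2 <;> omega
  rw [hN, List.range_succ_eq_map, List.map_cons, List.map_map]
  refine List.cons_eq_cons.mpr ⟨by push_cast; ring, ?_⟩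
  refine List.map_congr_left ?_
  intro k _
  simp only [Function.comp]
  push_cast
  ring

-- the stride-3 blocks, flattened, are exactly range(a, n)
lemma pvBlocks (k : Nat) : ∀ (a n : Int), (n - a).toNat ≤ k →
    (PySem.List.pyRange a n 3).flatMap
      (fun b => PySem.List.pyRange b (min (b + 3) n) 1)
    = PySem.List.pyRange a n 1 := by
  induction k with
  | zero =>
    intro a n h
    rw [pvRange3_nil a n (by omega), PySem.List.pyRange_one_eq_nil (by omega)]
    rfl
  | succ k ih =>
    intro a n h
    by_cases hab : a < n
    · rw [pvRange3_cons a n hab, List.flatMap_cons, ih (a + 3) n (by omega),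
        PySem.List.pyRange_one_append a (min (a + 3) n) n (by omega) (by omega)]
      congr 1
      by_cases h3 : a + 3 ≤ n
      · rw [show min (a + 3) n = a + 3 by omega]
      · rw [show min (a + 3) n = n by omega,
          PySem.List.pyRange_one_eq_nil (le_refl n),
          PySem.List.pyRange_one_eq_nil (by omega)]
    · rw [pvRange3_nil a n (by omega), PySem.List.pyRange_one_eq_nil (by omega)]
      rfl

lemma pv_itemsB (n : Int) :
    generate_dependencies_py_alt n
    = (PySem.List.pyRange 0 n 1).map
        (fun i => (pvTaskId i,
          if 0 < i ∧ PySem.Int.mod i 3 = 0 then [pvTaskId (i - 1)] else [])) := by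
  unfold generate_dependencies_py_alt
  have hcong : List.foldl
      (fun (deps : PySem.Dict String (List String)) base =>
        let deps := deps.insert (pvTaskId base)
          (if 0 < base then [pvTaskId (base - 1)] else [])
        (PySem.List.pyRange (base + 1) (min (base + 3) n) 1).foldl
          (fun d i => d.insert (pvTaskId i) []) deps)
      PySem.Dict.empty (PySem.List.pyRange 0 n 3)
    = List.foldl
      (fun (d : PySem.Dict String (List String)) b =>
        List.foldl
          (fun d i => d.insert (pvTaskId i)
            (if 0 < i ∧ PySem.Int.mod i 3 = 0 then [pvTaskId (i - 1)] else []))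
          d (PySem.List.pyRange b (min (b + 3) n) 1))
      PySem.Dict.empty (PySem.List.pyRange 0 n 3) := by
    refine PySem.List.foldl_congr_mem _ _ _ _ ?_
    intro acc b hb
    rw [PySem.List.mem_pyRange_iff_of_pos (by norm_num)] at hb
    obtain ⟨hb0, hbn, hdvd⟩ := hb
    have hdvd' : (3 : Int) ∣ b := by simpa using hdvd
    rw [PySem.List.pyRange_one_cons (show b < min (b + 3) n by omega), List.foldl_cons]
    have hmodb : PySem.Int.mod b 3 = 0 := (PySem.Int.mod_eq_zero_iff_dvd b 3).mpr hdvd'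
    have hvb : (if 0 < b ∧ PySem.Int.mod b 3 = 0 then [pvTaskId (b - 1)] else [])
        = (if 0 < b then [pvTaskId (b - 1)] else []) := by
      by_cases h0 : 0 < b <;> simp [h0, hdvd']
    dsimp only []
    rw [hvb]
    refine PySem.List.foldl_congr_mem _ _ _ _ ?_
    intro acc2 i hi
    rw [PySem.List.mem_pyRange_one] at hi
    have hnd : ¬ (3 : Int) ∣ i := by
      rintro ⟨c, rfl⟩
      obtain ⟨cb, rfl⟩ := hdvd'
      omega
    simp [hnd]
  rw [hcong, ← List.foldl_flatMap, pvBlocks (n - 0).toNat 0 n (by omega), pv_fresh_fold]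

-- ===== VERDICT (by name: the statement is the Claim_ definition above) =====
theorem generate_dependencies_py_spec : Claim_equal_generate_dependencies_py := by
  intro n _
  show generate_dependencies_py n = generate_dependencies_py_alt n
  rw [pv_itemsA, pv_itemsB]
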